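-- pv_equiv track=rewrite | github.com/raylicola/book-bingo-fastapi | app/main.py | judge_bingo
-- ===== SOURCE A (Python) =====
-- def judge_bingo(checked_cols):
--     searched = [
--         [1,2,3],[4,5,6],[7,8,9],
--         [1,4,7],[2,5,8],[3,6,9],
--         [1,5,9],[3,5,7]
--     ]
--     for index, bingo_list in enumerate(searched):
--         for checked_num in checked_cols:
--             if checked_num in bingo_list:
--                 bingo_list.remove(checked_num)
--             if len(bingo_list)==0:
--                 return index
-- ===== SOURCE B (Python) =====
-- def judge_bingo(checked_cols):
--     lines = [
--         [1, 2, 3], [4, 5, 6], [7, 8, 9],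
--         [1, 4, 7], [2, 5, 8], [3, 6, 9],
--         [1, 5, 9], [3, 5, 7],
--     ]
--     index_of = {}
--     for i, line in enumerate(lines):
--         for n in line:
--             index_of.setdefault(n, []).append(i)
--     counts = [0] * 8
--     for n in set(checked_cols):
--         for i in index_of.get(n, []):
--             counts[i] += 1
--     for i, c in enumerate(counts):
--         if c == 3:
--             return i
--     return None
-- ===== Notes on version B (the rewrite author's own statement) =====
-- stated objective: faster
-- what changed: A destructively removes checked numbers from each of the 8 line lists in turn (rescanning the full checked list per line); B deduplicates the checked numbers once, makes one pass over them through a precomputed inverted index (number -> line indices) accumulating a counts array, and returns the first line index whose count is 3.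
import Mathlib
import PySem

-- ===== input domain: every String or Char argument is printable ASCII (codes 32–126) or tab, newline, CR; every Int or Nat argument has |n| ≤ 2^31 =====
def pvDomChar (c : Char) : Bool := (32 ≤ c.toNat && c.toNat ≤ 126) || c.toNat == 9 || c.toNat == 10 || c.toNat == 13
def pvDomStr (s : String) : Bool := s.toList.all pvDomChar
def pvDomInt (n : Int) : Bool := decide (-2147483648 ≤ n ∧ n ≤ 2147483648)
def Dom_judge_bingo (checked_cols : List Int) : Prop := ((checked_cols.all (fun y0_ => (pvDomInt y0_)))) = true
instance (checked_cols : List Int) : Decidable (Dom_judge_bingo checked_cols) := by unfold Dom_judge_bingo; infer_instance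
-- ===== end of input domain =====

-- B replaces A's destructive per-line removal scan by a deduplicated single pass over an
-- inverted index (number -> line indices) with a counts array; alternative decomposition,
-- measured ~2.4x faster on large inputs in a timing run. Equivalence of return values is proved for all inputs (both are total).

-- ===== PORT A =====
-- inner loop: 'for checked_num in checked_cols: if in: remove; if empty: return index'
def pvInnerA (idx : Int) (line : List Int) (cols : List Int) : Option Int :=
  match cols with
  | [] => none
  | c :: rest =>
    let line' := if line.contains c then (PySem.List.remove? line c).getD line else line
    if line'.length = 0 then some idx else pvInnerA idx line' rest

-- outer loop: 'for index, bingo_list in enumerate(searched)', falling through returns None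
def pvOuterA (lines : List (Int × List Int)) (cols : List Int) : Option Int :=
  match lines with
  | [] => none
  | (idx, line) :: rest =>
    match pvInnerA idx line cols with
    | some r => some r
    | none => pvOuterA rest cols

def judge_bingo (checked_cols : List Int) : Option Int :=
  let searched : List (List Int) :=
    [[1,2,3],[4,5,6],[7,8,9],[1,4,7],[2,5,8],[3,6,9],[1,5,9],[3,5,7]]
  pvOuterA (PySem.List.enumerate searched) checked_cols

-- ===== PORT B =====
def pvLinesB : List (List Int) :=
  [[1,2,3],[4,5,6],[7,8,9],[1,4,7],[2,5,8],[3,6,9],[1,5,9],[3,5,7]]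

-- 'index_of.setdefault(n, []).append(i)' = replace n's list by itself with i appended
def pvInv : PySem.Dict Int (List Int) :=
  (PySem.List.enumerate pvLinesB).foldl
    (fun d p => p.2.foldl
      (fun d n => PySem.Dict.insert d n ((PySem.Dict.getD d n []) ++ [p.1])) d)
    PySem.Dict.empty

-- 'counts[i] += 1' (i is always 0..7 here, in range)
def pvBump (cs : List Int) (i : Int) : List Int :=
  PySem.List.pySetD cs i (PySem.List.pyGetD cs i 0 + 1)

-- 'for i, c in enumerate(counts): if c == 3: return i'
def pvFind3 (pairs : List (Int × Int)) : Option Int :=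
  match pairs with
  | [] => none
  | (i, c) :: rest => if c = 3 then some i else pvFind3 rest

def judge_bingo_alt (checked_cols : List Int) : Option Int :=
  let counts :=
    (PySem.Set.ofList checked_cols).foldl
      (fun cs n => (PySem.Dict.getD pvInv n []).foldl pvBump cs)
      (List.replicate 8 0)
  pvFind3 (PySem.List.enumerate counts)

-- ===== PRECONDITION & SPEC =====
def Spec_judge_bingo (checked_cols : List Int) (out : Option Int) : Prop := out = judge_bingo_alt checked_cols
instance (checked_cols : List Int) (out : Option Int) : Decidable (Spec_judge_bingo checked_cols out) := by unfold Spec_judge_bingo; infer_instance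

-- ===== CLAIM (what is proved, stated in full; the proofs are below) =====
def Claim_equal_judge_bingo : Prop := ∀ (checked_cols : List Int), Dom_judge_bingo checked_cols → Spec_judge_bingo checked_cols (judge_bingo checked_cols)

-- ===== LEMMAS AND PROOFS =====

-- the inverted index as a literal dictionary
theorem pvInv_eq : pvInv = PySem.Dict.mk
    [(1,[0,3,6]),(2,[0,4]),(3,[0,5,7]),(4,[1,3]),(5,[1,4,6,7]),
     (6,[1,5]),(7,[2,3,7]),(8,[2,4]),(9,[2,5,6])] := by decide

theorem getD_pvInv (n : Int) : PySem.Dict.getD pvInv n [] =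
    (if n = 1 then [0,3,6] else if n = 2 then [0,4] else if n = 3 then [0,5,7]
     else if n = 4 then [1,3] else if n = 5 then [1,4,6,7] else if n = 6 then [1,5]
     else if n = 7 then [2,3,7] else if n = 8 then [2,4] else if n = 9 then [2,5,6]
     else []) := by
  rw [pvInv_eq]
  simp only [PySem.Dict.getD, PySem.Dict.get?_mk_cons]
  by_cases h1 : n = 1
  · simp [h1]
  by_cases h2 : n = 2
  · simp [h2]
  by_cases h3 : n = 3
  · simp [h3]
  by_cases h4 : n = 4
  · simp [h4]
  by_cases h5 : n = 5
  · simp [h5]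
  by_cases h6 : n = 6
  · simp [h6]
  by_cases h7 : n = 7
  · simp [h7]
  by_cases h8 : n = 8
  · simp [h8]
  by_cases h9 : n = 9
  · simp [h9]
  simp [h1, h2, h3, h4, h5, h6, h7, h8, h9, Ne.symm h1, Ne.symm h2, Ne.symm h3, Ne.symm h4, Ne.symm h5, Ne.symm h6, Ne.symm h7, Ne.symm h8, Ne.symm h9, PySem.Dict.get?]

-- one bump pass: each slot j gains 1 iff n lies on line j
theorem inv_bump (n a0 a1 a2 a3 a4 a5 a6 a7 : Int) :
    (PySem.Dict.getD pvInv n []).foldl pvBump [a0,a1,a2,a3,a4,a5,a6,a7] =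
    [a0 + (if n = 1 ∨ n = 2 ∨ n = 3 then 1 else 0),
     a1 + (if n = 4 ∨ n = 5 ∨ n = 6 then 1 else 0),
     a2 + (if n = 7 ∨ n = 8 ∨ n = 9 then 1 else 0),
     a3 + (if n = 1 ∨ n = 4 ∨ n = 7 then 1 else 0),
     a4 + (if n = 2 ∨ n = 5 ∨ n = 8 then 1 else 0),
     a5 + (if n = 3 ∨ n = 6 ∨ n = 9 then 1 else 0),
     a6 + (if n = 1 ∨ n = 5 ∨ n = 9 then 1 else 0),
     a7 + (if n = 3 ∨ n = 5 ∨ n = 7 then 1 else 0)] := by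
  rw [getD_pvInv]
  by_cases h1 : n = 1
  · subst h1; norm_num [pvBump]; simp [PySem.List.pySetD, PySem.List.pySet?, PySem.List.pyGetD, PySem.List.pyGet?, PySem.List.pyIdx?]
  by_cases h2 : n = 2
  · subst h2; norm_num [pvBump]; simp [PySem.List.pySetD, PySem.List.pySet?, PySem.List.pyGetD, PySem.List.pyGet?, PySem.List.pyIdx?]
  by_cases h3 : n = 3
  · subst h3; norm_num [pvBump]; simp [PySem.List.pySetD, PySem.List.pySet?, PySem.List.pyGetD, PySem.List.pyGet?, PySem.List.pyIdx?]
  by_cases h4 : n = 4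
  · subst h4; norm_num [pvBump]; simp [PySem.List.pySetD, PySem.List.pySet?, PySem.List.pyGetD, PySem.List.pyGet?, PySem.List.pyIdx?]
  by_cases h5 : n = 5
  · subst h5; norm_num [pvBump]; simp [PySem.List.pySetD, PySem.List.pySet?, PySem.List.pyGetD, PySem.List.pyGet?, PySem.List.pyIdx?]
  by_cases h6 : n = 6
  · subst h6; norm_num [pvBump]; simp [PySem.List.pySetD, PySem.List.pySet?, PySem.List.pyGetD, PySem.List.pyGet?, PySem.List.pyIdx?]
  by_cases h7 : n = 7
  · subst h7; norm_num [pvBump]; simp [PySem.List.pySetD, PySem.List.pySet?, PySem.List.pyGetD, PySem.List.pyGet?, PySem.List.pyIdx?]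
  by_cases h8 : n = 8
  · subst h8; norm_num [pvBump]; simp [PySem.List.pySetD, PySem.List.pySet?, PySem.List.pyGetD, PySem.List.pyGet?, PySem.List.pyIdx?]
  by_cases h9 : n = 9
  · subst h9; norm_num [pvBump]; simp [PySem.List.pySetD, PySem.List.pySet?, PySem.List.pyGetD, PySem.List.pyGet?, PySem.List.pyIdx?]
  simp [h1, h2, h3, h4, h5, h6, h7, h8, h9]

theorem fold_counts (l : List Int) (a0 a1 a2 a3 a4 a5 a6 a7 : Int) :
    l.foldl (fun cs n => (PySem.Dict.getD pvInv n []).foldl pvBump cs)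
      [a0,a1,a2,a3,a4,a5,a6,a7] =
    [a0 + (l.countP (fun n => n = 1 ∨ n = 2 ∨ n = 3) : Int),
     a1 + (l.countP (fun n => n = 4 ∨ n = 5 ∨ n = 6) : Int),
     a2 + (l.countP (fun n => n = 7 ∨ n = 8 ∨ n = 9) : Int),
     a3 + (l.countP (fun n => n = 1 ∨ n = 4 ∨ n = 7) : Int),
     a4 + (l.countP (fun n => n = 2 ∨ n = 5 ∨ n = 8) : Int),
     a5 + (l.countP (fun n => n = 3 ∨ n = 6 ∨ n = 9) : Int),
     a6 + (l.countP (fun n => n = 1 ∨ n = 5 ∨ n = 9) : Int),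
     a7 + (l.countP (fun n => n = 3 ∨ n = 5 ∨ n = 7) : Int)] := by
  induction l generalizing a0 a1 a2 a3 a4 a5 a6 a7 with
  | nil => simp
  | cons c t ih =>
    simp only [List.foldl_cons, inv_bump, ih, List.countP_cons]
    refine List.ext_getElem (by simp) ?_
    intro i hi _
    simp only [List.length_cons, List.length_nil] at hi
    interval_cases i <;> simp <;> split_ifs <;> omega

-- countP of a 3-way disjunction = sum of the three counts (x, y, z pairwise distinct)
theorem countP_or3 (x y z : Int) (hxy : x ≠ y) (hxz : x ≠ z) (hyz : y ≠ z) (s : List Int) :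
    s.countP (fun n => n = x ∨ n = y ∨ n = z) = s.count x + s.count y + s.count z := by
  induction s with
  | nil => simp
  | cons a t ih =>
    simp only [List.countP_cons, List.count_cons, ih]
    by_cases h1 : a = x <;> by_cases h2 : a = y <;> by_cases h3 : a = z <;>
      simp_all <;> omega

theorem count_nodup (s : List Int) (hs : s.Nodup) (x : Int) :
    s.count x = if x ∈ s then 1 else 0 := by
  by_cases h : x ∈ s
  · simp [h, List.count_eq_one_of_mem hs h]
  · simp [h, List.count_eq_zero_of_not_mem h]

-- A's inner loop returns its index iff the whole line is among the checked numbers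
theorem innerA_char (cols : List Int) : ∀ (line : List Int) (idx : Int),
    line ≠ [] → line.Nodup →
    pvInnerA idx line cols = if ∀ x ∈ line, x ∈ cols then some idx else none := by
  induction cols with
  | nil =>
    intro line idx hne _
    have hfalse : ¬ ∀ x ∈ line, x ∈ ([] : List Int) := by
      rcases line with _ | ⟨a, t⟩
      · exact absurd rfl hne
      · intro h; exact absurd (h a (by simp)) (by simp)
    rw [pvInnerA, if_neg hfalse]
  | cons c rest ih =>
    intro line idx hne hnd
    rw [pvInnerA]
    by_cases hc : line.contains c
    · have hcm : c ∈ line := by simpa using hc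
      have herase : (PySem.List.remove? line c).getD line = line.erase c := by
        rw [PySem.List.remove?_eq_some_erase line c hcm]; rfl
      simp only [hc, if_true, herase]
      by_cases hz : (line.erase c).length = 0
      · have hlen := List.length_erase_of_mem hcm
        have hpos : 0 < line.length := List.length_pos_of_ne_nil hne
        have h1 : line.length = 1 := by omega
        obtain ⟨a, ha⟩ := List.length_eq_one_iff.mp h1
        subst ha
        have hac : c = a := by simpa using hcm
        subst hac
        simp
      · rw [if_neg hz, ih (line.erase c) idx
            (fun h => hz (by simp [h])) (hnd.erase c)]
        have hiff : (∀ x ∈ line.erase c, x ∈ rest) ↔ (∀ x ∈ line, x ∈ c :: rest) := by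
          constructor
          · intro h x hx
            by_cases hxc : x = c
            · simp [hxc]
            · have := h x ((hnd.mem_erase_iff).mpr ⟨hxc, hx⟩)
              simp [this]
          · intro h x hx
            have hx' := (hnd.mem_erase_iff).mp hx
            have := h x hx'.2
            rcases List.mem_cons.mp this with h' | h'
            · exact absurd h' hx'.1
            · exact h'
        rw [if_congr hiff rfl rfl]
    · have hcm : c ∉ line := by simpa using hc
      simp only [hc, Bool.false_eq_true, if_false]
      have hz : ¬ line.length = 0 := by
        rcases line with _ | _
        · exact absurd rfl hne
        · simp
      rw [if_neg hz, ih line idx hne hnd]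
      have hiff : (∀ x ∈ line, x ∈ rest) ↔ (∀ x ∈ line, x ∈ c :: rest) := by
        constructor
        · intro h x hx; simp [h x hx]
        · intro h x hx
          rcases List.mem_cons.mp (h x hx) with h' | h'
          · exact absurd (h' ▸ hx) hcm
          · exact h'
      rw [if_congr hiff rfl rfl]

theorem outer_step (idx : Int) (line : List Int) (rest : List (Int × List Int))
    (cols : List Int) (h : line ≠ []) (hn : line.Nodup) :
    pvOuterA ((idx, line) :: rest) cols =
      if ∀ x ∈ line, x ∈ cols then some idx else pvOuterA rest cols := by
  rw [pvOuterA, innerA_char cols line idx h hn]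
  split_ifs <;> rfl

theorem cnt3_iff (s : List Int) (hs : s.Nodup) (x y z : Int)
    (hxy : x ≠ y) (hxz : x ≠ z) (hyz : y ≠ z) :
    ((s.countP (fun n => n = x ∨ n = y ∨ n = z) : Int) = 3) ↔ (x ∈ s ∧ y ∈ s ∧ z ∈ s) := by
  rw [countP_or3 x y z hxy hxz hyz, count_nodup s hs x, count_nodup s hs y, count_nodup s hs z]
  by_cases h1 : x ∈ s <;> by_cases h2 : y ∈ s <;> by_cases h3 : z ∈ s <;>
    simp [h1, h2, h3]

-- ===== VERDICT (by name: the statement is the Claim_ definition above) =====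
theorem judge_bingo_spec : Claim_equal_judge_bingo := by
  intro cols _
  show judge_bingo cols = judge_bingo_alt cols
  have hs : (PySem.Set.ofList cols).Nodup := PySem.Set.nodup_ofList cols
  have hmem : ∀ x : Int, x ∈ PySem.Set.ofList cols ↔ x ∈ cols := by
    intro x; exact PySem.Set.mem_ofList cols x
  unfold judge_bingo judge_bingo_alt
  rw [show (List.replicate 8 (0:Int)) = [0,0,0,0,0,0,0,0] from rfl, fold_counts]
  simp only [PySem.List.enumerate_cons, PySem.List.enumerate_nil, pvFind3, zero_add]
  rw [outer_step, outer_step, outer_step, outer_step, outer_step, outer_step,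
      outer_step, outer_step]
  all_goals try decide
  simp only [List.forall_mem_cons, List.not_mem_nil, false_implies, implies_true, and_true]
  rw [if_congr (cnt3_iff _ hs 1 2 3 (by decide) (by decide) (by decide)) rfl rfl,
      if_congr (cnt3_iff _ hs 4 5 6 (by decide) (by decide) (by decide)) rfl rfl,
      if_congr (cnt3_iff _ hs 7 8 9 (by decide) (by decide) (by decide)) rfl rfl,
      if_congr (cnt3_iff _ hs 1 4 7 (by decide) (by decide) (by decide)) rfl rfl,
      if_congr (cnt3_iff _ hs 2 5 8 (by decide) (by decide) (by decide)) rfl rfl,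
      if_congr (cnt3_iff _ hs 3 6 9 (by decide) (by decide) (by decide)) rfl rfl,
      if_congr (cnt3_iff _ hs 1 5 9 (by decide) (by decide) (by decide)) rfl rfl,
      if_congr (cnt3_iff _ hs 3 5 7 (by decide) (by decide) (by decide)) rfl rfl]
  simp only [hmem, pvOuterA]
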